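-- pv_equiv track=rewrite | github.com/zzusp/spec-agent | scripts/spec_agent_engine_core.py | _recommended_next_stage
-- ===== SOURCE A (Python) =====
-- SUBAGENT_STAGE_ORDER = ["analysis", "prd", "tech", "acceptance", "final_check"]
--
-- SUBAGENT_STAGE_DEPENDENCIES = {
--     "analysis": [],
--     "prd": ["analysis"],
--     "tech": ["analysis", "prd"],
--     "acceptance": ["analysis", "prd", "tech"],
--     "final_check": ["analysis", "prd", "tech", "acceptance"],
-- }
--
-- def _recommended_next_stage(stages: dict) -> str:
--     """Return the next runnable stage according to dependency completion."""
--     for stage in SUBAGENT_STAGE_ORDER: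
--         state = stages.get(stage, {})
--         if state.get("status") == "completed":
--             continue
--         deps = SUBAGENT_STAGE_DEPENDENCIES.get(stage, [])
--         blocked = [dep for dep in deps if stages.get(dep, {}).get("status") != "completed"]
--         if not blocked:
--             return stage
--     return ""
-- ===== SOURCE B (Python) =====
-- SUBAGENT_STAGE_ORDER = ["analysis", "prd", "tech", "acceptance", "final_check"]
--
-- def _recommended_next_stage(stages: dict) -> str:
--     """All dependencies are prefixes of the stage order, so the first
--     non-completed stage is always runnable: return it directly."""
--     for stage in SUBAGENT_STAGE_ORDER:
--         if stages.get(stage, {}).get("status") != "completed":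
--             return stage
--     return ""
-- ===== Notes on version B (the rewrite author's own statement) =====
-- stated objective: simpler
-- what changed: Since every stage's dependency list is exactly the prefix of the stage order, the per-stage blocked-dependency scan is vacuous at the first non-completed stage; B drops the dependency table and inner comprehension entirely and returns the first stage whose status is not 'completed'.
import Mathlib
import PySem

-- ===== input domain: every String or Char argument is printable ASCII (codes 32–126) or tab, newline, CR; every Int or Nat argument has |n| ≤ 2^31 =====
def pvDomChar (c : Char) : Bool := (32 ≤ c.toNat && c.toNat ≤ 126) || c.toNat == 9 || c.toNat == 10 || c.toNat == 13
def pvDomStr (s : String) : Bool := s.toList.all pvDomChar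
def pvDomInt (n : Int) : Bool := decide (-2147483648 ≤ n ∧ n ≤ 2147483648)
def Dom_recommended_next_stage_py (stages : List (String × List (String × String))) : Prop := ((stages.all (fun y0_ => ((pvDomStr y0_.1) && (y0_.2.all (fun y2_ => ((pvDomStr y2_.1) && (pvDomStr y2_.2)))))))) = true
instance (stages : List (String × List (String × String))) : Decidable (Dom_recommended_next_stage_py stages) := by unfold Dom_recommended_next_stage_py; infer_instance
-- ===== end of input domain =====

-- B drops the dependency table (every dependency list is a prefix of the stage order,
-- so the check is vacuous at the first non-completed stage): simpler single pass.

-- ===== PORT A =====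
def pvStageOrder : List String := ["analysis", "prd", "tech", "acceptance", "final_check"]

def pvStageDeps : PySem.Dict String (List String) :=
  PySem.Dict.mk
    [("analysis", []), ("prd", ["analysis"]), ("tech", ["analysis", "prd"]),
     ("acceptance", ["analysis", "prd", "tech"]),
     ("final_check", ["analysis", "prd", "tech", "acceptance"])]

-- stages.get(stage, {}).get("status") == "completed"  (shared by both ports; the input
-- assoc list is read as a Python dict via PySem.Dict.mk: first match wins)
def pvCompleted (stages : List (String × List (String × String))) (stage : String) : Bool :=
  PySem.Dict.get? (PySem.Dict.mk (PySem.Dict.getD (PySem.Dict.mk stages) stage [])) "status"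
    == some "completed"

def pvALoop (stages : List (String × List (String × String))) : List String → String
  | [] => ""
  | stage :: rest =>
    if pvCompleted stages stage then pvALoop stages rest
    else
      let deps := PySem.Dict.getD pvStageDeps stage []
      let blocked := deps.filter (fun dep => !(pvCompleted stages dep))
      if blocked = [] then stage else pvALoop stages rest

def recommended_next_stage_py (stages : List (String × List (String × String))) : String :=
  pvALoop stages pvStageOrder

-- ===== PORT B =====
def pvBLoop (stages : List (String × List (String × String))) : List String → String
  | [] => ""
  | stage :: rest =>
    if !(pvCompleted stages stage) then stage else pvBLoop stages rest

def recommended_next_stage_py_alt (stages : List (String × List (String × String))) : String :=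
  pvBLoop stages pvStageOrder

-- ===== PRECONDITION & SPEC =====
def Spec_recommended_next_stage_py (stages : List (String × List (String × String))) (out : String) : Prop := out = recommended_next_stage_py_alt stages
instance (stages : List (String × List (String × String))) (out : String) : Decidable (Spec_recommended_next_stage_py stages out) := by unfold Spec_recommended_next_stage_py; infer_instance

-- ===== CLAIM (what is proved, stated in full; the proofs are below) =====
def Claim_equal_recommended_next_stage_py : Prop := ∀ (stages : List (String × List (String × String))), Dom_recommended_next_stage_py stages → Spec_recommended_next_stage_py stages (recommended_next_stage_py stages)

-- ===== LEMMAS AND PROOFS =====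
theorem deps_analysis : PySem.Dict.getD pvStageDeps "analysis" [] = [] := by decide
theorem deps_prd : PySem.Dict.getD pvStageDeps "prd" [] = ["analysis"] := by decide
theorem deps_tech : PySem.Dict.getD pvStageDeps "tech" [] = ["analysis", "prd"] := by decide
theorem deps_acceptance : PySem.Dict.getD pvStageDeps "acceptance" [] = ["analysis", "prd", "tech"] := by decide
theorem deps_final : PySem.Dict.getD pvStageDeps "final_check" [] = ["analysis", "prd", "tech", "acceptance"] := by decide

theorem recommended_next_stage_eq (stages : List (String × List (String × String))) :
    recommended_next_stage_py stages = recommended_next_stage_py_alt stages := by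
  unfold recommended_next_stage_py recommended_next_stage_py_alt pvStageOrder
  by_cases h0 : pvCompleted stages "analysis"
  · by_cases h1 : pvCompleted stages "prd"
    · by_cases h2 : pvCompleted stages "tech"
      · by_cases h3 : pvCompleted stages "acceptance"
        · by_cases h4 : pvCompleted stages "final_check"
          · simp [pvALoop, pvBLoop, h0, h1, h2, h3, h4]
          · simp [pvALoop, pvBLoop, deps_final, h0, h1, h2, h3, h4]
        · simp [pvALoop, pvBLoop, deps_acceptance, h0, h1, h2, h3]
      · simp [pvALoop, pvBLoop, deps_tech, h0, h1, h2]
    · simp [pvALoop, pvBLoop, deps_prd, h0, h1]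
  · simp [pvALoop, pvBLoop, deps_analysis, h0]

-- ===== VERDICT (by name: the statement is the Claim_ definition above) =====
theorem recommended_next_stage_py_spec : Claim_equal_recommended_next_stage_py := by
  intro stages _
  exact recommended_next_stage_eq stages
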